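-- pv_equiv track=rewrite | github.com/Loc-Tran/SimpleTCP | sender.py | give_total_dup_acks
-- ===== SOURCE A (Python) =====
-- def give_total_dup_acks(dup_acks):
--     result = 0
--     for i in dup_acks.keys():
--         if dup_acks[i] == 1:
--             continue
--         else:
--             result += dup_acks[i] - 1
--     return result
-- ===== SOURCE B (Python) =====
-- def give_total_dup_acks(dup_acks):
--     # Divide and conquer over the list of counts: the excess of an interval
--     # (sum of count-1 over its entries) is the sum of the excesses of its halves.
--     vals = list(dup_acks.values())
--
--     def excess(lo, hi):
--         if hi - lo == 0:
--             return 0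
--         if hi - lo == 1:
--             return vals[lo] - 1
--         mid = (lo + hi) // 2
--         return excess(lo, mid) + excess(mid, hi)
--
--     return excess(0, len(vals))
-- ===== Notes on version B (the rewrite author's own statement) =====
-- stated objective: alternative
-- what changed: Replaces A's single linear pass over the keys with conditional accumulation by a divide-and-conquer recursion: the values list is split at the midpoint and the excess (count-1 per entry) of the two halves is summed, correct because excess is additive over concatenation.
import Mathlib
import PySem

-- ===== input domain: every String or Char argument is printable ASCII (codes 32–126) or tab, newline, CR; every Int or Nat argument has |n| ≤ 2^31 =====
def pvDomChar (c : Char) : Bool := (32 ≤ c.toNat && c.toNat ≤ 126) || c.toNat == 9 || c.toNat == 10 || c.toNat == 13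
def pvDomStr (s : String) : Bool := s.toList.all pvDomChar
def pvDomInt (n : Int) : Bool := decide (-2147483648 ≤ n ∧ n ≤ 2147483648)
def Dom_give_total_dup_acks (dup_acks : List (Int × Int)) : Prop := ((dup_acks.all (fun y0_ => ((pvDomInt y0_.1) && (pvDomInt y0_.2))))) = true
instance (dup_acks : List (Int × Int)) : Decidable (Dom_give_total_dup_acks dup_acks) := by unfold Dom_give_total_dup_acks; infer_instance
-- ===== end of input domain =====

-- B replaces A's per-key conditional accumulation loop with a divide-and-conquer recursion over the values list; objective: alternative.


-- ===== PORT A =====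
-- for i in dup_acks.keys(): if dup_acks[i] == 1: continue else: result += dup_acks[i] - 1
def give_total_dup_acks (dup_acks : List (Int × Int)) : Int :=
  let d : PySem.Dict Int Int := PySem.Dict.mk dup_acks
  d.keys.foldl (fun result i =>
    if d.getD i 0 == 1 then result else result + (d.getD i 0 - 1)) 0

-- ===== PORT B =====
-- def excess(lo, hi): base cases for empty / singleton interval, else split at mid = (lo+hi)//2
def excessGo (vals : List Int) (lo hi : Nat) : Int :=
  if hi - lo = 0 then 0
  else if hi - lo = 1 then vals.getD lo 0 - 1
  else excessGo vals lo ((lo + hi) / 2) + excessGo vals ((lo + hi) / 2) hi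
  termination_by hi - lo
  decreasing_by all_goals omega

-- vals = list(dup_acks.values()); return excess(0, len(vals))
def give_total_dup_acks_alt (dup_acks : List (Int × Int)) : Int :=
  let vals := (PySem.Dict.mk dup_acks).values
  excessGo vals 0 vals.length

-- ===== PRECONDITION & SPEC =====
-- Pre_ excludes association lists with duplicate keys: those do not represent any Python dict
-- (the argument of A), so no behaviour of A is defined for them.
def Pre_give_total_dup_acks (dup_acks : List (Int × Int)) : Prop :=
  (dup_acks.map (·.1)).Nodup
instance (dup_acks : List (Int × Int)) : Decidable (Pre_give_total_dup_acks dup_acks) := by unfold Pre_give_total_dup_acks; infer_instance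

def pvWitness_give_total_dup_acks : (List (Int × Int)) := [(3, 5), (4, 1), (7, 2)]

def Spec_give_total_dup_acks (dup_acks : List (Int × Int)) (out : Int) : Prop := out = give_total_dup_acks_alt dup_acks
instance (dup_acks : List (Int × Int)) (out : Int) : Decidable (Spec_give_total_dup_acks dup_acks out) := by unfold Spec_give_total_dup_acks; infer_instance

-- ===== CLAIM (what is proved, stated in full; the proofs are below) =====
def Claim_equal_give_total_dup_acks : Prop := ∀ (dup_acks : List (Int × Int)), Dom_give_total_dup_acks dup_acks → Pre_give_total_dup_acks dup_acks → Spec_give_total_dup_acks dup_acks (give_total_dup_acks dup_acks)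

-- ===== LEMMAS AND PROOFS =====

-- B's recursion computes sum(slice) - length over the interval [lo, hi).
theorem excessGo_eq (vals : List Int) :
    ∀ (n lo hi : Nat), hi - lo = n → hi ≤ vals.length →
      excessGo vals lo hi = ((vals.drop lo).take (hi - lo)).sum - (hi - lo : Nat) := by
  intro n
  induction n using Nat.strong_induction_on with
  | _ n ih =>
    intro lo hi hn hle
    rcases Nat.lt_or_ge n 2 with h2 | h2
    · interval_cases n
      · rw [excessGo]; simp [hn]
      · have hlt : lo < vals.length := by omega
        rw [excessGo]
        rw [List.drop_eq_getElem_cons hlt]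
        simp [hn, List.getD_eq_getElem?_getD, hlt]
    · have hne0 : hi - lo ≠ 0 := by omega
      have hne1 : hi - lo ≠ 1 := by omega
      set mid := (lo + hi) / 2 with hmid
      have hlm : lo < mid := by omega
      have hmh : mid < hi := by omega
      rw [excessGo]
      simp only [hne0, hne1, if_false, ← hmid]
      rw [ih (mid - lo) (by omega) lo mid rfl (by omega),
          ih (hi - mid) (by omega) mid hi rfl hle]
      have hsplit : (vals.drop lo).take (hi - lo)
          = (vals.drop lo).take (mid - lo) ++ (vals.drop mid).take (hi - mid) := by
        have h1 : hi - lo = (mid - lo) + (hi - mid) := by omega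
        have h2 : lo + (mid - lo) = mid := by omega
        rw [h1, List.take_add, List.drop_drop, h2]
      rw [hsplit, List.sum_append]
      have : ((hi - lo : Nat) : Int) = ((mid - lo : Nat) : Int) + ((hi - mid : Nat) : Int) := by
        rw [Nat.cast_sub (by omega), Nat.cast_sub (by omega), Nat.cast_sub (by omega)]; ring
      rw [this]; ring

-- A's fold over the keys, when every key looks up its own pair's value, equals sum(values) - length.
theorem foldA_eq (d : PySem.Dict Int Int) :
    ∀ (l : List (Int × Int)) (acc : Int), (∀ p ∈ l, d.getD p.1 0 = p.2) →
      (l.map (·.1)).foldl (fun result i =>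
        if d.getD i 0 == 1 then result else result + (d.getD i 0 - 1)) acc
      = acc + (l.map (·.2)).sum - l.length := by
  intro l
  induction l with
  | nil => intro acc _; simp
  | cons p t ih =>
    intro acc h
    have hp : d.getD p.1 0 = p.2 := h p (by simp)
    have ht : ∀ q ∈ t, d.getD q.1 0 = q.2 := fun q hq => h q (by simp [hq])
    simp only [List.map_cons, List.foldl_cons, hp, List.sum_cons, List.length_cons]
    by_cases h1 : p.2 = 1
    · simp only [h1, beq_self_eq_true, if_true, ih acc ht]
      push_cast; ring
    · have : (p.2 == 1) = false := by simp [h1]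
      simp only [this, Bool.false_eq_true, if_false, ih _ ht]
      push_cast; ring

-- ===== VERDICT (by name: the statement is the Claim_ definition above) =====
theorem give_total_dup_acks_spec : Claim_equal_give_total_dup_acks := by
  intro dup_acks _ hpre
  unfold Spec_give_total_dup_acks give_total_dup_acks give_total_dup_acks_alt
  have hnd : (PySem.Dict.mk dup_acks).keys.Nodup := by
    simpa [PySem.Dict.keys] using hpre
  have hlook : ∀ p ∈ dup_acks, (PySem.Dict.mk dup_acks).getD p.1 0 = p.2 := by
    intro p hp
    have hmem : (p.1, p.2) ∈ (PySem.Dict.mk dup_acks).items := by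
      simpa [PySem.Dict.items] using hp
    exact PySem.Dict.getD_of_mem_items _ hmem hnd 0
  have hkeys : (PySem.Dict.mk dup_acks).keys = dup_acks.map (·.1) := by
    simp [PySem.Dict.keys]
  have hvals : (PySem.Dict.mk dup_acks).values = dup_acks.map (·.2) := by
    simp [PySem.Dict.values]
  have hB := excessGo_eq (dup_acks.map (·.2)) (dup_acks.map (·.2)).length 0
    (dup_acks.map (·.2)).length rfl (le_refl _)
  simp only [Nat.sub_zero, List.drop_zero, List.take_length] at hB
  simp only [List.length_map] at hB
  simp only [hvals, List.length_map, hB]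
  simpa [hkeys] using foldA_eq (PySem.Dict.mk dup_acks) dup_acks 0 hlook
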